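-- pv_equiv track=rewrite | github.com/formgt/hillel_pythone_course | Lesson_5/Task_3.py | create_hashtag
-- ===== SOURCE A (Python) =====
-- import string
--
-- def create_hashtag(text):
--     for p in string.punctuation:
--         text = text.replace(p, "")
--     words = text.split()
--     words = [w.capitalize() for w in words]
--     hashtag = "#" + "".join(words)
--     if len(hashtag) > 140:
--         hashtag = hashtag[:140]
--     return hashtag
-- ===== SOURCE B (Python) =====
-- import string
--
-- _PUNCT = set(string.punctuation)
--
-- def create_hashtag(text):
--     cleaned = ''.join(c for c in text if c not in _PUNCT)
--     return ("#" + "".join(w.capitalize() for w in cleaned.split()))[:140]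
-- ===== Notes on version B (the rewrite author's own statement) =====
-- stated objective: idiomatic
-- what changed: Replaces the 32 whole-string replace() passes (one per punctuation character) with a single membership-filtered pass over the input's characters, and folds the capitalize/join/truncate tail into one expression with an unconditional [:140] slice.
import Mathlib
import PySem

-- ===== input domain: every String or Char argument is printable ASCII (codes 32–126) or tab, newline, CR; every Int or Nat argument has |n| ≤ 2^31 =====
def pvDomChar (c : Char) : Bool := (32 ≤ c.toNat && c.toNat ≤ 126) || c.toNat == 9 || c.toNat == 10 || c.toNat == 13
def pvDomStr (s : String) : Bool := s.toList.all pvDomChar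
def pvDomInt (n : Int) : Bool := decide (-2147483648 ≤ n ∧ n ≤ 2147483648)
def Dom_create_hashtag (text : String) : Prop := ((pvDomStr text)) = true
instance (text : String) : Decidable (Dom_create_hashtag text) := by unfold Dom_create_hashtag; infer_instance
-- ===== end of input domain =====

-- B replaces A's 32 whole-string replace() passes with one membership-filtered pass over the input and an unconditional [:140] slice (objective: idiomatic).

-- string.punctuation
def pvPunct : List Char := "!\"#$%&'()*+,-./:;<=>?@[\\]^_`{|}~".toList

-- str.capitalize (exact on ASCII): first char uppercased, rest lowercased
def pvCapitalize (w : List Char) : List Char :=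
  match w with
  | [] => []
  | c :: rest => PySem.Chars.upperChar c :: PySem.Chars.lower rest

-- ===== PORT A =====
def create_hashtag (text : String) : String :=
  let cleaned := pvPunct.foldl (fun s p => PySem.Chars.replace s [p] []) text.toList
  let words := PySem.Chars.split₀ cleaned
  let words := words.map pvCapitalize
  let hashtag := '#' :: PySem.Chars.join [] words
  let hashtag := if PySem.Chars.len hashtag > 140 then PySem.Chars.slice hashtag none (some 140) else hashtag
  String.ofList hashtag

-- ===== PORT B =====
def create_hashtag_alt (text : String) : String :=
  let cleaned := text.toList.filter (fun c => !(pvPunct.contains c))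
  String.ofList (PySem.Chars.slice
    ('#' :: PySem.Chars.join [] ((PySem.Chars.split₀ cleaned).map pvCapitalize)) none (some 140))

-- ===== PRECONDITION & SPEC =====
def Spec_create_hashtag (text : String) (out : String) : Prop := out = create_hashtag_alt text
instance (text : String) (out : String) : Decidable (Spec_create_hashtag text out) := by unfold Spec_create_hashtag; infer_instance

-- ===== CLAIM (what is proved, stated in full; the proofs are below) =====
def Claim_equal_create_hashtag : Prop := ∀ (text : String), Dom_create_hashtag text → Spec_create_hashtag text (create_hashtag text)

-- ===== LEMMAS AND PROOFS =====

-- replace by one character with "" is a filter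
lemma replace_go_single (p : Char) : ∀ (l : List Char) (fuel : Nat) (acc : List Char),
    l.length ≤ fuel →
    PySem.Chars.replace.go [p] [] fuel l acc = acc.reverse ++ l.filter (fun c => !(c == p)) := by
  intro l
  induction l with
  | nil =>
      intro fuel acc _
      cases fuel <;> simp [PySem.Chars.replace.go]
  | cons c t ih =>
      intro fuel acc hle
      cases fuel with
      | zero => simp at hle
      | succ fuel =>
        by_cases hc : c = p
        · subst hc
          have hpre : List.isPrefixOf [c] (c :: t) = true := by
            simp [List.isPrefixOf]
          simp only [PySem.Chars.replace.go, hpre, if_pos, List.length_cons,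
            List.length_nil, List.drop_succ_cons, List.drop_zero, List.reverse_nil,
            List.nil_append]
          rw [ih fuel acc (by simpa using Nat.le_of_succ_le_succ hle)]
          simp
        · have hpre : List.isPrefixOf [p] (c :: t) = false := by
            simp [List.isPrefixOf]
            exact fun h => hc h.symm
          simp only [PySem.Chars.replace.go, hpre]
          rw [ih fuel (c :: acc) (by simpa using Nat.le_of_succ_le_succ hle)]
          simp [hc]

lemma replace_single (p : Char) (l : List Char) :
    PySem.Chars.replace l [p] [] = l.filter (fun c => !(c == p)) := by
  have : PySem.Chars.replace l [p] [] = PySem.Chars.replace.go [p] [] l.length l [] := by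
    simp [PySem.Chars.replace]
  rw [this, replace_go_single p l l.length [] le_rfl]
  simp

-- folding single-character replaces over ps removes exactly the characters of ps
lemma foldl_replace_eq_filter (ps : List Char) (cs : List Char) :
    ps.foldl (fun s p => PySem.Chars.replace s [p] []) cs
      = cs.filter (fun c => !(ps.contains c)) := by
  induction ps generalizing cs with
  | nil => simp
  | cons p ps ih =>
      simp only [List.foldl_cons]
      rw [replace_single, ih, List.filter_filter]
      apply List.filter_congr
      intro c _
      by_cases h : c = p <;> simp [h]

-- ===== VERDICT (by name: the statement is the Claim_ definition above) =====
theorem create_hashtag_spec : Claim_equal_create_hashtag := by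
  intro text _
  show create_hashtag text = create_hashtag_alt text
  simp only [create_hashtag, create_hashtag_alt]
  rw [foldl_replace_eq_filter]
  congr 1
  split_ifs with hlen
  · rfl
  · -- length ≤ 140: the [:140] slice is the identity
    rw [PySem.Chars.slice_eq_listSlice,
      PySem.List.slice_to _ (show (0:Int) ≤ 140 by norm_num)]
    rw [PySem.Chars.len_eq] at hlen
    exact (List.take_of_length_le (by omega)).symm
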